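-- pv_equiv track=rewrite | github.com/OSH212/instructo | agents/feedback_agent.py | _parse_feedback
-- ===== SOURCE A (Python) =====
-- def _parse_feedback(feedback):
--     #logger.debug(f"Parsing feedback: {feedback[:200]}...")
--     sections = feedback.split('###')
--     parsed_feedback = {
--         #'overall_analysis': '',
--         #'content_creator_feedback': {},
--         #'evaluator_feedback': '',
--         'improvements_needed': '',
--         'everything': '',
--     }
--
--     for section in sections:
--         section = section.strip()
--         if section:
--             lines = section.split('\n', 1)
--             if len(lines) > 1:
--                 header, content = lines
--                 header = header.lower().strip()
--                 content = content.strip()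
--
--                 # if 'overall analysis' in header:
--                 #     parsed_feedback['overall_analysis'] = content
--                 # if 'feedback for content creator' in header:
--                 #     parsed_feedback['content_creator_feedback'] = content
--                 #     # for line in content.split('\n'):
--                 #     #     if ':' in line:
--                 #     #         key, value = line.split(':', 1)
--                 #     #         parsed_feedback['content_creator_feedback'][key.strip()] = value.strip()
--                 # if 'feedback for evaluator' in header:
--                 #     parsed_feedback['evaluator_feedback'] = content
--                 if 'improvements needed' in header:
--                     parsed_feedback['improvements_needed'] = content
--                 else:
--                     parsed_feedback['everything'] += f"### {header.capitalize()}\n{content}\n\n"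
--
--     # Removng "Improvements Needed" section from 'everything'
--     parsed_feedback['everything'] = parsed_feedback['everything'].replace(f"### Improvements Needed\n{parsed_feedback['improvements_needed']}\n\n", "")
--
--     #logger.debug(f"Parsed feedback: {parsed_feedback}")
--     return parsed_feedback
-- ===== SOURCE B (Python) =====
-- def _parse_feedback(feedback):
--     # Collect (header, content) pairs once, then derive both fields from the list.
--     pairs = []
--     for section in feedback.split('###'):
--         section = section.strip()
--         if section:
--             parts = section.split('\n', 1)
--             if len(parts) == 2:
--                 pairs.append((parts[0].lower().strip(), parts[1].strip()))
--     improvements = next((c for h, c in reversed(pairs) if 'improvements needed' in h), '')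
--     everything = ''.join(f"### {h.capitalize()}\n{c}\n\n"
--                          for h, c in pairs if 'improvements needed' not in h)
--     # Same (no-op) cleanup call as the original, kept so the output matches exactly.
--     everything = everything.replace(f"### Improvements Needed\n{improvements}\n\n", "")
--     return {'improvements_needed': improvements, 'everything': everything}
-- ===== Notes on version B (the rewrite author's own statement) =====
-- stated objective: alternative
-- what changed: Replaces the dict-threading single loop with a collect-then-derive decomposition: one pass extracts (header, content) pairs, then improvements_needed is found by a reversed search over the pairs and everything by a join over the non-matching pairs; the original's trailing replace call is kept verbatim.
import Mathlib
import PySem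

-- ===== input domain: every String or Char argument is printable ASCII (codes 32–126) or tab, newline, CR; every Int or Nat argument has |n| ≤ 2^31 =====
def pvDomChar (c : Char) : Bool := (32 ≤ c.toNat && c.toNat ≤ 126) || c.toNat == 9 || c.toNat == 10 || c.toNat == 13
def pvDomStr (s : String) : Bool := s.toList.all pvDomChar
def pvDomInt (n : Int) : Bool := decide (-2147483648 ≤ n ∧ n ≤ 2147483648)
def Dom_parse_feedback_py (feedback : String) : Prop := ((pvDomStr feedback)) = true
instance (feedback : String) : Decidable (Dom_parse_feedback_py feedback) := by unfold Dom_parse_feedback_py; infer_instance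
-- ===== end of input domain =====

-- B replaces A's dict-threading loop by a collect-(header,content)-pairs pass and two derivations
-- (reversed search for improvements_needed, join over the rest for everything); same return value.

-- ===== PORT A =====
-- str.capitalize(): upper-case the first character, lower-case the rest — exact on the ASCII domain
def pyCapitalize (s : String) : String :=
  match s.toList with
  | [] => ""
  | c :: rest => String.ofList (PySem.Chars.upperChar c :: PySem.Chars.lower rest)

-- the body of A's `for section in sections:` loop, threading the dict
def pvStepA (d : PySem.Dict String String) (sec : String) : PySem.Dict String String :=
  let s := PySem.Str.strip sec
  if s ≠ "" then
    -- section.split('\n', 1): sep "\n" ≠ "" so splitMax? = some; len(lines) > 1 ↔ the two-element case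
    match (PySem.Str.splitMax? s "\n" 1).getD [] with
    | [header, content] =>
      let header := PySem.Str.strip (PySem.Str.lower header)
      let content := PySem.Str.strip content
      if PySem.Str.isIn "improvements needed" header then
        d.insert "improvements_needed" content
      else
        d.insert "everything"
          (PySem.Str.join "" [d.getD "everything" "", "### ", pyCapitalize header, "\n", content, "\n\n"])
    | _ => d
  else d

def parse_feedback_py (feedback : String) : List (String × String) :=
  -- feedback.split('###'): sep "###" ≠ "" so split? = some
  let sections := (PySem.Str.split? feedback "###").getD []
  let init : PySem.Dict String String :=
    PySem.Dict.ofList [("improvements_needed", ""), ("everything", "")]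
  let d := sections.foldl pvStepA init
  (d.insert "everything"
      (PySem.Str.replace (d.getD "everything" "")
        (PySem.Str.join "" ["### Improvements Needed\n", d.getD "improvements_needed" "", "\n\n"]) "")).items

-- ===== PORT B =====
-- one section of the first pass: Some (lowered stripped header, stripped content) if it splits in two
def pvParseSec (sec : String) : Option (String × String) :=
  let s := PySem.Str.strip sec
  if s ≠ "" then
    match (PySem.Str.splitMax? s "\n" 1).getD [] with
    | [header, content] => some (PySem.Str.strip (PySem.Str.lower header), PySem.Str.strip content)
    | _ => none
  else none

def pvEntry (h c : String) : String :=
  PySem.Str.join "" ["### ", pyCapitalize h, "\n", c, "\n\n"]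

def parse_feedback_py_alt (feedback : String) : List (String × String) :=
  let pairs := ((PySem.Str.split? feedback "###").getD []).filterMap pvParseSec
  let imp := ((pairs.reverse.find? (fun p => PySem.Str.isIn "improvements needed" p.1)).map Prod.snd).getD ""
  let ev := PySem.Str.join ""
    ((pairs.filter (fun p => !PySem.Str.isIn "improvements needed" p.1)).map (fun p => pvEntry p.1 p.2))
  [("improvements_needed", imp),
   ("everything",
     PySem.Str.replace ev (PySem.Str.join "" ["### Improvements Needed\n", imp, "\n\n"]) "")]

-- ===== PRECONDITION & SPEC =====
def Spec_parse_feedback_py (feedback : String) (out : List (String × String)) : Prop := out = parse_feedback_py_alt feedback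
instance (feedback : String) (out : List (String × String)) : Decidable (Spec_parse_feedback_py feedback out) := by unfold Spec_parse_feedback_py; infer_instance

-- ===== CLAIM (what is proved, stated in full; the proofs are below) =====
def Claim_equal_parse_feedback_py : Prop := ∀ (feedback : String), Dom_parse_feedback_py feedback → Spec_parse_feedback_py feedback (parse_feedback_py feedback)

-- ===== LEMMAS AND PROOFS =====

-- the two-key dict A's loop actually threads
def pvMkD (i e : String) : PySem.Dict String String :=
  ⟨[("improvements_needed", i), ("everything", e)]⟩

-- A's loop body, seen on the pair of values (improvements_needed, everything)
def pvStepP (st : String × String) (sec : String) : String × String :=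
  match pvParseSec sec with
  | none => st
  | some (h, c) =>
    if PySem.Str.isIn "improvements needed" h then (c, st.2)
    else (st.1, PySem.Str.join "" [st.2, "### ", pyCapitalize h, "\n", c, "\n\n"])

lemma pvInsert_imp (i e c : String) : (pvMkD i e).insert "improvements_needed" c = pvMkD c e := by
  simp [pvMkD, PySem.Dict.insert, PySem.Dict.contains]

lemma pvInsert_ev (i e c : String) : (pvMkD i e).insert "everything" c = pvMkD i c := by
  simp [pvMkD, PySem.Dict.insert, PySem.Dict.contains]

lemma pvGetD_ev (i e : String) : (pvMkD i e).getD "everything" "" = e := by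
  simp [pvMkD, PySem.Dict.getD, PySem.Dict.get?]

lemma pvGetD_imp (i e : String) : (pvMkD i e).getD "improvements_needed" "" = i := by
  simp [pvMkD, PySem.Dict.getD, PySem.Dict.get?]

lemma pvJoinNil (l : List String) :
    (PySem.Str.join "" l).toList = (l.map String.toList).flatten := by
  simp [PySem.Str.join, PySem.Chars.join]
  induction l with
  | nil => rfl
  | cons x xs ih =>
    cases xs with
    | nil => simp [List.intercalate]
    | cons y ys => simp_all [List.intercalate]

lemma pvStepA_mkD (i e : String) (sec : String) :
    pvStepA (pvMkD i e) sec = pvMkD (pvStepP (i, e) sec).1 (pvStepP (i, e) sec).2 := by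
  unfold pvStepA pvStepP pvParseSec
  dsimp only
  by_cases hs : PySem.Str.strip sec ≠ ""
  · rw [if_pos hs, if_pos hs]
    rcases (PySem.Str.splitMax? (PySem.Str.strip sec) "\n" 1).getD [] with _ | ⟨a, _ | ⟨b, _ | _⟩⟩
    · rfl
    · rfl
    · dsimp only
      split_ifs with hin
      · rw [pvInsert_imp]
      · rw [pvGetD_ev, pvInsert_ev]
    · rfl
  · rw [if_neg hs, if_neg hs]

lemma pvFoldA (secs : List String) : ∀ i e : String,
    secs.foldl pvStepA (pvMkD i e)
      = pvMkD (secs.foldl pvStepP (i, e)).1 (secs.foldl pvStepP (i, e)).2 := by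
  induction secs with
  | nil => intro i e; rfl
  | cons sec secs ih =>
    intro i e
    rw [List.foldl_cons, List.foldl_cons, pvStepA_mkD, ih, Prod.mk.eta]

lemma pvFold_fst (secs : List String) : ∀ i e : String,
    (secs.foldl pvStepP (i, e)).1
      = (((secs.filterMap pvParseSec).reverse.find?
            (fun p => PySem.Str.isIn "improvements needed" p.1)).map Prod.snd).getD i := by
  induction secs with
  | nil => intro i e; rfl
  | cons sec secs ih =>
    intro i e
    rw [List.foldl_cons, List.filterMap_cons]
    cases hp : pvParseSec sec with
    | none => simp only [pvStepP, hp]; exact ih i e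
    | some pr =>
      obtain ⟨h, c⟩ := pr
      simp only [pvStepP, hp, List.reverse_cons, List.find?_append]
      cases hin : PySem.Str.isIn "improvements needed" h with
      | true =>
        rw [if_pos rfl, ih c e]
        have h1 : List.find? (fun p => PySem.Str.isIn "improvements needed" p.1) [(h, c)]
            = some (h, c) := List.find?_cons_of_pos hin
        rw [h1]
        cases hf : (secs.filterMap pvParseSec).reverse.find?
            (fun p => PySem.Str.isIn "improvements needed" p.1) with
        | none => simp
        | some q => simp
      | false =>
        rw [if_neg (by simp), ih i _]
        have h1 : List.find? (fun p => PySem.Str.isIn "improvements needed" p.1) [(h, c)]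
            = none := by
          rw [List.find?_cons_of_neg (by rw [hin]; exact Bool.false_ne_true)]; rfl
        rw [h1]
        simp

lemma pvFold_snd (secs : List String) : ∀ i e : String,
    (secs.foldl pvStepP (i, e)).2.toList
      = e.toList ++ (((secs.filterMap pvParseSec).filter
            (fun p => !PySem.Str.isIn "improvements needed" p.1)).map
              (fun p => (pvEntry p.1 p.2).toList)).flatten := by
  induction secs with
  | nil => intro i e; simp
  | cons sec secs ih =>
    intro i e
    rw [List.foldl_cons, List.filterMap_cons]
    cases hp : pvParseSec sec with
    | none => simp only [pvStepP, hp]; exact ih i e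
    | some pr =>
      obtain ⟨h, c⟩ := pr
      simp only [pvStepP, hp]
      cases hin : PySem.Str.isIn "improvements needed" h with
      | true =>
        rw [if_pos rfl]
        simp only [List.filter_cons, hin, Bool.not_true]
        exact ih c e
      | false =>
        rw [if_neg (by simp)]
        simp only [List.filter_cons, hin, Bool.not_false]
        rw [ih, pvJoinNil]
        simp [pvEntry, PySem.Str.join, PySem.Chars.join, List.intercalate, List.append_assoc]

lemma pvInitD :
    (PySem.Dict.ofList [("improvements_needed", ""), ("everything", "")] : PySem.Dict String String)
      = pvMkD "" "" := rfl

-- ===== VERDICT (by name: the statement is the Claim_ definition above) =====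
theorem parse_feedback_py_spec : Claim_equal_parse_feedback_py := by
  intro feedback _
  unfold Spec_parse_feedback_py parse_feedback_py parse_feedback_py_alt
  dsimp only
  rw [pvInitD, pvFoldA, pvGetD_ev, pvGetD_imp, pvInsert_ev]
  set secs := (PySem.Str.split? feedback "###").getD [] with hsecs
  have hI : (secs.foldl pvStepP ("", "")).1
      = (((secs.filterMap pvParseSec).reverse.find?
            (fun p => PySem.Str.isIn "improvements needed" p.1)).map Prod.snd).getD "" :=
    pvFold_fst secs "" ""
  have hE : (secs.foldl pvStepP ("", "")).2
      = PySem.Str.join ""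
          (((secs.filterMap pvParseSec).filter
              (fun p => !PySem.Str.isIn "improvements needed" p.1)).map (fun p => pvEntry p.1 p.2)) := by
    apply String.toList_inj.mp
    rw [pvFold_snd secs "" "", pvJoinNil, List.map_map]
    simp [Function.comp_def]
  rw [hI, hE]
  rfl
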